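-- pv_equiv track=rewrite | github.com/google/coding-competitions-archive | codejam/2019/round_1b/draupnir/problem_statement/local_testing_tool.py | ComputeDay
-- ===== SOURCE A (Python) =====
-- MOD = 2 ** 63
--
-- def ComputeDay(s, d):
--   rings_per_day = list(s)
--   for i in range(1, d + 1):
--     for j in range(1, 7):
--       if i % j == 0:
--         rings_per_day[j - 1] += rings_per_day[j - 1]
--         rings_per_day[j - 1] %= MOD
--   return rings_per_day
-- ===== SOURCE B (Python) =====
-- MOD = 2 ** 63
--
-- def ComputeDay(s, d):
--   # ring i+1 doubles exactly d // (i+1) times over d days (once per multiple of i+1)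
--   return [(v * pow(2, d // (i + 1), MOD)) % MOD if i < 6 and d // (i + 1) > 0 else v
--           for i, v in enumerate(s)]
-- ===== Notes on version B (the rewrite author's own statement) =====
-- stated objective: faster
-- what changed: Replaces A's day-by-day in-place doubling loop with a single comprehension over enumerate(s): ring i+1 doubles exactly d//(i+1) times, so each entry is s[i]*pow(2, d//(i+1), MOD) % MOD computed directly.
import Mathlib
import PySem

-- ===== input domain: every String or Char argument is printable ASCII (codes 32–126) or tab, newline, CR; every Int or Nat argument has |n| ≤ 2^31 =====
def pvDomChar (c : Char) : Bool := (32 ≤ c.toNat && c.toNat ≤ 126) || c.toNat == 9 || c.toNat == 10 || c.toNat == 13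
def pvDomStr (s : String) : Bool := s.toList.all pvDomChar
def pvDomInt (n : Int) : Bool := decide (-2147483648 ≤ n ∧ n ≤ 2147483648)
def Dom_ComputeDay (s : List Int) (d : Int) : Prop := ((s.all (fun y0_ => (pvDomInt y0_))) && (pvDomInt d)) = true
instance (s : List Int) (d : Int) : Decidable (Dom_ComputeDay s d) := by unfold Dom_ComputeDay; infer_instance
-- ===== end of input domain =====

-- B replaces A's day-by-day in-place doubling loop with one comprehension over enumerate(s):
-- ring i+1 doubles ⌊d/(i+1)⌋ times, so each entry is s[i]·2^(d//(i+1)) mod 2^63 (objective: faster).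

-- module constant MOD = 2 ** 63
def MOD : Int := 2 ^ 63

-- ===== PORT A =====
def ComputeDay (s : List Int) (d : Int) : List Int :=
  (PySem.List.pyRange 1 (d + 1) 1).foldl (fun r i =>
    (PySem.List.pyRange 1 7 1).foldl (fun r j =>
      if PySem.Int.mod i j = 0 then
        -- rings_per_day[j-1] += rings_per_day[j-1]; rings_per_day[j-1] %= MOD
        r.modify (j - 1).toNat (fun v => PySem.Int.mod (v + v) MOD)
      else r) r) s

-- ===== PORT B =====
def ComputeDay_alt (s : List Int) (d : Int) : List Int :=
  (PySem.List.enumerate s).map (fun p =>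
    if p.1 < 6 ∧ 0 < PySem.Int.floordiv d (p.1 + 1) then
      PySem.Int.mod (p.2 * 2 ^ (PySem.Int.floordiv d (p.1 + 1)).toNat) MOD
    else p.2)

-- ===== PRECONDITION & SPEC =====
-- Pre_ excludes exactly the inputs on which Python A raises IndexError:
-- fewer than 6 rings while some day d ≥ len(s)+1 makes the loop touch a missing index.
def Pre_ComputeDay (s : List Int) (d : Int) : Prop := 6 ≤ s.length ∨ d ≤ (s.length : Int)
instance (s : List Int) (d : Int) : Decidable (Pre_ComputeDay s d) := by unfold Pre_ComputeDay; infer_instance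
def pvWitness_ComputeDay : List Int × Int := ([1, 2, 3, 4, 5, 6], 10)

def Spec_ComputeDay (s : List Int) (d : Int) (out : List Int) : Prop := out = ComputeDay_alt s d
instance (s : List Int) (d : Int) (out : List Int) : Decidable (Spec_ComputeDay s d out) := by unfold Spec_ComputeDay; infer_instance

-- ===== CLAIM (what is proved, stated in full; the proofs are below) =====
def Claim_equal_ComputeDay : Prop := ∀ (s : List Int) (d : Int), Dom_ComputeDay s d → Pre_ComputeDay s d → Spec_ComputeDay s d (ComputeDay s d)

-- ===== LEMMAS AND PROOFS =====

-- the doubling step A applies to one entry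
def fA (v : Int) : Int := PySem.Int.mod (v + v) MOD

-- A's inner loop (one day)
def stepA (r : List Int) (i : Int) : List Int :=
  (PySem.List.pyRange 1 7 1).foldl (fun r j =>
    if PySem.Int.mod i j = 0 then
      r.modify (j - 1).toNat (fun v => PySem.Int.mod (v + v) MOD)
    else r) r

lemma range17 : PySem.List.pyRange 1 7 1 = [1, 2, 3, 4, 5, 6] := by decide

lemma condget (r : List Int) (c : Prop) [Decidable c] (p : Nat) (f : Int → Int) (idx : Nat) :
    (if c then r.modify p f else r)[idx]? = if c ∧ p = idx then r[idx]?.map f else r[idx]? := by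
  by_cases hc : c
  · by_cases hp : p = idx
    · subst hp; simp [hc, List.getElem?_modify_eq, Option.map_eq_map]
    · simp [hc, hp, List.getElem?_modify_ne _ r hp]
  · simp [hc]

lemma stepA_get (r : List Int) (i : Int) (idx : Nat) :
    (stepA r i)[idx]? =
      if idx < 6 ∧ PySem.Int.mod i ((idx : Int) + 1) = 0 then r[idx]?.map fA else r[idx]? := by
  rw [stepA, range17]
  simp only [List.foldl_cons, List.foldl_nil, condget, PySem.Int.mod_eq_zero_iff_dvd,
    show ((1:Int) - 1).toNat = 0 from rfl, show ((2:Int) - 1).toNat = 1 from rfl, show ((3:Int) - 1).toNat = 2 from rfl, show ((4:Int) - 1).toNat = 3 from rfl, show ((5:Int) - 1).toNat = 4 from rfl, show ((6:Int) - 1).toNat = 5 from rfl,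
    show fA = (fun v => PySem.Int.mod (v + v) MOD) from rfl]
  by_cases h : idx < 6
  · interval_cases idx <;> norm_num
  · have h0 : idx ≠ 0 := by omega
    have h1 : idx ≠ 1 := by omega
    have h2 : idx ≠ 2 := by omega
    have h3 : idx ≠ 3 := by omega
    have h4 : idx ≠ 4 := by omega
    have h5 : idx ≠ 5 := by omega
    norm_num [h, Ne.symm h0, Ne.symm h1, Ne.symm h2, Ne.symm h3, Ne.symm h4, Ne.symm h5]

lemma alt_get (s : List Int) (d : Int) (idx : Nat) :
    (ComputeDay_alt s d)[idx]? =
      if idx < 6 ∧ 0 < PySem.Int.floordiv d ((idx : Int) + 1) then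
        s[idx]?.map (fun v => PySem.Int.mod (v * 2 ^ (PySem.Int.floordiv d ((idx : Int) + 1)).toNat) MOD)
      else s[idx]? := by
  rw [ComputeDay_alt, List.getElem?_map, PySem.List.getElem?_enumerate]
  cases hs : s[idx]? with
  | none => simp
  | some v =>
    simp only [Option.map_some]
    have hcast : ((idx : Int) < 6) ↔ idx < 6 := by exact_mod_cast Iff.rfl
    by_cases h : idx < 6 ∧ 0 < PySem.Int.floordiv d ((idx : Int) + 1)
    · rw [if_pos h, if_pos (by simpa [hcast, zero_add] using h)]
      simp
    · rw [if_neg h, if_neg (by simpa [hcast, zero_add] using h)]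

lemma MOD_pos : (0 : Int) < MOD := by unfold MOD; norm_num

lemma modMOD (x : Int) : PySem.Int.mod x MOD = x % MOD :=
  PySem.Int.mod_eq_emod_of_pos MOD_pos

lemma fA_iter (c : Nat) (v : Int) :
    fA^[c] v = if c = 0 then v else PySem.Int.mod (v * 2 ^ c) MOD := by
  induction c with
  | zero => simp
  | succ n ih =>
    rw [Function.iterate_succ_apply', ih]
    by_cases hn : n = 0
    · subst hn
      simp [fA, modMOD]
      congr 1
      ring
    · simp only [if_neg hn, if_neg (by omega : n + 1 ≠ 0), fA, modMOD]
      have : v * 2 ^ n % MOD + v * 2 ^ n % MOD = (v * 2 ^ n % MOD) * 2 := by ring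
      rw [this, Int.mul_emod, Int.emod_emod_of_dvd _ (dvd_refl MOD), ← Int.mul_emod]
      congr 1
      ring

lemma computeDay_eq (s : List Int) (d : Int) :
    ComputeDay s d = ((List.range d.toNat).map (fun k : Nat => (1 : Int) + k)).foldl stepA s := by
  rw [ComputeDay,
    show PySem.List.pyRange 1 (d + 1) 1 = (List.range d.toNat).map (fun k : Nat => (1 : Int) + k) from by
      rw [PySem.List.pyRange_one, show (d + 1 - 1).toNat = d.toNat from by omega]]
  rfl

lemma A_loop (s : List Int) (n : Nat) (idx : Nat) :
    (((List.range n).map (fun k : Nat => (1 : Int) + k)).foldl stepA s)[idx]? =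
      if idx < 6 then s[idx]?.map (fA^[n / (idx + 1)]) else s[idx]? := by
  induction n with
  | zero => simp
  | succ n ih =>
    rw [List.range_succ, List.map_append, List.foldl_append]
    simp only [List.map_cons, List.map_nil, List.foldl_cons, List.foldl_nil]
    rw [stepA_get, ih]
    by_cases h : idx < 6
    · simp only [h, true_and, if_true]
      have hdvd : PySem.Int.mod (1 + (n : Int)) ((idx : Int) + 1) = 0 ↔ (idx + 1) ∣ (n + 1) := by
        rw [PySem.Int.mod_eq_zero_iff_dvd]
        constructor
        · intro hd
          have : ((idx + 1 : Nat) : Int) ∣ ((n + 1 : Nat) : Int) := by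
            push_cast; rwa [add_comm (n : Int) 1]
          exact_mod_cast this
        · intro hd
          have : ((idx + 1 : Nat) : Int) ∣ ((n + 1 : Nat) : Int) := by exact_mod_cast hd
          rw [show (1 + (n : Int)) = ((n + 1 : Nat) : Int) by push_cast; ring]
          exact_mod_cast this
      rw [Nat.succ_div]
      by_cases hd : (idx + 1) ∣ (n + 1)
      · rw [if_pos (hdvd.mpr hd), if_pos hd]
        cases hs : s[idx]? with
        | none => simp
        | some v =>
          simp only [hs, Option.map_some, if_true]
          rw [show fA (fA^[n / (idx + 1)] v) = fA^[n / (idx + 1) + 1] v from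
            (Function.iterate_succ_apply' fA _ v).symm]
      · rw [if_neg (fun hc => hd (hdvd.mp hc)), if_neg hd]
        simp
    · simp [h]

lemma key (s : List Int) (d : Int) (idx : Nat) (h : idx < 6) :
    s[idx]?.map (fA^[d.toNat / (idx + 1)]) =
      if 0 < PySem.Int.floordiv d ((idx : Int) + 1) then
        s[idx]?.map (fun v => PySem.Int.mod (v * 2 ^ (PySem.Int.floordiv d ((idx : Int) + 1)).toNat) MOD)
      else s[idx]? := by
  by_cases hd : 0 ≤ d
  · have hk : PySem.Int.floordiv d ((idx : Int) + 1) = ((d.toNat / (idx + 1) : Nat) : Int) := by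
      rw [show d = ((d.toNat : Nat) : Int) by omega, show ((idx : Int) + 1) = ((idx + 1 : Nat) : Int) by push_cast; ring]
      exact PySem.Int.floordiv_natCast _ _
    set c : Nat := d.toNat / (idx + 1) with hc
    rw [hk]
    by_cases hcz : c = 0
    · simp [hcz]
    · rw [if_pos (by exact_mod_cast Nat.pos_of_ne_zero hcz)]
      have : ((c : Int)).toNat = c := Int.toNat_natCast c
      rw [this]
      cases s[idx]? with
      | none => rfl
      | some v => simp [fA_iter c v, hcz]
  · have hneg : PySem.Int.floordiv d ((idx : Int) + 1) < 1 := by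
      rw [PySem.Int.floordiv_lt_iff_lt_mul (by omega : (0:Int) < (idx : Int) + 1)]
      omega
    rw [if_neg (by omega)]
    have : d.toNat = 0 := by omega
    simp [this]

-- ===== VERDICT (by name: the statement is the Claim_ definition above) =====
theorem ComputeDay_spec : Claim_equal_ComputeDay := by
  intro s d _ _
  unfold Spec_ComputeDay
  apply List.ext_getElem?
  intro idx
  rw [computeDay_eq, A_loop, alt_get]
  by_cases h : idx < 6
  · simp only [if_pos h, h, true_and]
    exact key s d idx h
  · simp [h]
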